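-- pv_equiv track=rewrite | github.com/HHGigi/Count_Chunks | wrk1.py | count_chunks
-- ===== SOURCE A (Python) =====
-- def count_chunks(array):
--         """
--          Please implement this method to return count of chunks in given array.
--          Chunk is defined as continous sequence of one or more numbers separated
--          by one or more zeroes.
--          Array can contain leading and trailing zeroes.
--          Example: array [5, 4, 0, 0, -1, 0, 2, 0, 0] contains 3 chunks
--
--
--         :param array: list of numbers
--         :returns: number
--
--         count_chunks([5, 4, 0, 0, -1, 0, 2, 0, 0])
--         3
--         count_chunks([3,4,6,0,0,0,0,-6,7,6,9,0,0,5,9,-7,0,0,5,3])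
--         4
--
--         """
--
--         previous_digit=0
--         total=0
--         for digit in array:
--             if previous_digit == 0 and digit !=0:
--                 total += 1
--             previous_digit=digit
--
--         return total
-- ===== SOURCE B (Python) =====
-- def count_chunks(array):
--     # A chunk of length L contributes L nonzero elements and L-1 adjacent
--     # nonzero pairs, so #chunks = #nonzeros - #adjacent-nonzero-pairs.
--     nonzeros = sum(x != 0 for x in array)
--     pairs = sum(a != 0 and b != 0 for a, b in zip(array, array[1:]))
--     return nonzeros - pairs
-- ===== Notes on version B (the rewrite author's own statement) =====
-- stated objective: alternative
-- what changed: Replaces the stateful previous-element edge-tracking loop by a closed arithmetic formulation: chunks = count of nonzero elements minus count of adjacent nonzero pairs, computed by two comprehension sums.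
import Mathlib
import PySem

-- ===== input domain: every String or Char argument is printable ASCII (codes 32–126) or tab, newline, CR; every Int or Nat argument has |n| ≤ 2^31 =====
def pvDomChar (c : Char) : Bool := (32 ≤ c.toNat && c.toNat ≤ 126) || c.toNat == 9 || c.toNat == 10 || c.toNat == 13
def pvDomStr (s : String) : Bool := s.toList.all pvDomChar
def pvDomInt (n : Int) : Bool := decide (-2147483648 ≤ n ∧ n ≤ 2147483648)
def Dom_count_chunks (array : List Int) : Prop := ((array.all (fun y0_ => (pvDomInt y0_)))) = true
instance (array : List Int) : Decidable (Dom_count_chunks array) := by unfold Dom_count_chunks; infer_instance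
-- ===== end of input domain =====

-- B replaces A's previous-element edge-tracking loop by the arithmetic identity
-- #chunks = #nonzero elements - #adjacent nonzero pairs (same O(n) cost, different decomposition).

-- ===== PORT A =====
def loopA : Int → Int → List Int → Int
  | _, total, [] => total
  | prev, total, d :: rest =>
      loopA d (if prev == 0 && d != 0 then total + 1 else total) rest

def count_chunks (array : List Int) : Int := loopA 0 0 array

-- ===== PORT B =====
def count_chunks_alt (array : List Int) : Int :=
  let nonzeros := (array.map (fun x => if x != 0 then (1 : Int) else 0)).sum
  let pairs := ((array.zip (array.drop 1)).map
      (fun ab => if ab.1 != 0 && ab.2 != 0 then (1 : Int) else 0)).sum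
  nonzeros - pairs

-- ===== PRECONDITION & SPEC =====
def Spec_count_chunks (array : List Int) (out : Int) : Prop := out = count_chunks_alt array
instance (array : List Int) (out : Int) : Decidable (Spec_count_chunks array out) := by unfold Spec_count_chunks; infer_instance

-- ===== CLAIM (what is proved, stated in full; the proofs are below) =====
def Claim_equal_count_chunks : Prop := ∀ (array : List Int), Dom_count_chunks array → Spec_count_chunks array (count_chunks array)

-- ===== LEMMAS AND PROOFS =====
def headNZ : List Int → Bool
  | [] => false
  | h :: _ => h != 0

lemma alt_cons (d : Int) (r : List Int) :
    count_chunks_alt (d :: r) =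
      (if d ≠ 0 then 1 else 0) - (if d ≠ 0 ∧ headNZ r then 1 else 0)
        + count_chunks_alt r := by
  cases r <;> simp [count_chunks_alt, headNZ] <;> split_ifs <;> simp_all <;> ring

lemma loopA_eq : ∀ (xs : List Int) (p t : Int),
    loopA p t xs =
      t + count_chunks_alt xs - (if p ≠ 0 ∧ headNZ xs then 1 else 0)
  | [], p, t => by simp [loopA, count_chunks_alt, headNZ]
  | d :: r, p, t => by
    rw [loopA, loopA_eq r d, alt_cons]
    simp only [headNZ]
    split_ifs <;> simp_all <;> ring

-- ===== VERDICT (by name: the statement is the Claim_ definition above) =====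
theorem count_chunks_spec : Claim_equal_count_chunks := by
  intro array _
  unfold Spec_count_chunks count_chunks
  rw [loopA_eq]
  cases array <;> simp [headNZ, count_chunks_alt]
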